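-- pv_equiv track=rewrite | github.com/Jennifer-Vo/Club-Recommendation-System- | club_functions.py | get_last_to_first
-- ===== SOURCE A (Python) =====
-- from typing import List, Tuple, Dict, TextIO
--
-- def update_dict(key: str, value: str,
--                 key_to_values: Dict[str, List[str]]) -> None:
--     """Update key_to_values with key/value. If key is in key_to_values,
--     and value is not already in the list associated with key,
--     append value to the list. Otherwise, add the pair key/[value] to
--     key_to_values.
--
--     >>> d = {'1': ['a', 'b']}
--     >>> update_dict('2', 'c', d)
--     >>> d == {'1': ['a', 'b'], '2': ['c']}
--     True
--     >>> update_dict('1', 'c', d)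
--     >>> d == {'1': ['a', 'b', 'c'], '2': ['c']}
--     True
--     >>> update_dict('1', 'c', d)
--     >>> d == {'1': ['a', 'b', 'c'], '2': ['c']}
--     True
--     """
--
--     if key not in key_to_values:
--         key_to_values[key] = []
--
--     if value not in key_to_values[key]:
--         key_to_values[key].append(value)
--
-- def get_last_to_first(
--         person_to_friends: Dict[str, List[str]]) -> Dict[str, List[str]]:
--     """Return a "last name to first name(s)" dictionary with the people from the
--     "person to friends" dictionary person_to_friends.
--
--     >>> get_last_to_first(P2F) == {
--     ...    'Katsopolis': ['Jesse'],
--     ...    'Tanner': ['Danny R', 'Michelle', 'Stephanie J'],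
--     ...    'Gladstone': ['Joey'],
--     ...    'Donaldson-Katsopolis': ['Rebecca'],
--     ...    'Gibbler': ['Kimmy'],
--     ...    'Tanner-Fuller': ['DJ']}
--     True
--     >>> get_last_to_first(P2F2) == {
--     ...    'Vo': ['Danny R', 'Jennifer'],
--     ...    'Yorkdale': ['Joey'],
--     ...    'Huang': ['Sophia'],
--     ...    'Possible': ['Kimmy']}
--     True
--     """
--     dict_lastname = {}
--     list_friends = []
--     for key in person_to_friends:
--         for value in person_to_friends[key]:
--             list_friends.append(value)
--             list_friends.append(str(key))
--     for name in list_friends: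
--         first_name = name.rsplit(' ', 1)[0]
--         last_name = name.rsplit(' ')[-1]
--         update_dict(last_name, first_name, dict_lastname)
--         dict_lastname[last_name].sort()
--     return dict_lastname
-- ===== SOURCE B (Python) =====
-- def split_name(name):
--     """(last, first) of a full name: split at the last space (rpartition),
--     a spaceless name is its own first and last name."""
--     head, sep, tail = name.rpartition(' ')
--     return (tail, head if sep else tail)
--
--
-- def get_last_to_first(person_to_friends):
--     """Return a "last name to first name(s)" dictionary for everybody who occurs
--     in person_to_friends (friends, and keys that have at least one friend).
--
--     Sort-then-group: build the complete (last, first) pair list, sort its set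
--     once lexicographically, group adjacent pairs by last name (so each group is
--     already the sorted unique first names), then order the keys by first
--     occurrence (A instead grows per-key lists incrementally, membership-testing
--     and re-sorting after every single name)."""
--     names = []
--     for key, friends in person_to_friends.items():
--         for friend in friends:
--             names.append(friend)
--             names.append(str(key))
--     pairs = [split_name(n) for n in names]
--     grouped = {}
--     for last, first in sorted(set(pairs)):
--         grouped.setdefault(last, []).append(first)
--     return {last: grouped[last] for last, _ in pairs}
-- ===== Notes on version B (the rewrite author's own statement) =====
-- stated objective: alternative
-- what changed: A grows a dict incrementally via an update_dict helper that membership-tests a per-key list and re-sorts it after every single name; B instead builds the complete (last, first) pair list (rpartition split), sorts its set once lexicographically, groups adjacent pairs by last name so each group is already the sorted unique first names, and finally orders the keys by first occurrence.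
import Mathlib
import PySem

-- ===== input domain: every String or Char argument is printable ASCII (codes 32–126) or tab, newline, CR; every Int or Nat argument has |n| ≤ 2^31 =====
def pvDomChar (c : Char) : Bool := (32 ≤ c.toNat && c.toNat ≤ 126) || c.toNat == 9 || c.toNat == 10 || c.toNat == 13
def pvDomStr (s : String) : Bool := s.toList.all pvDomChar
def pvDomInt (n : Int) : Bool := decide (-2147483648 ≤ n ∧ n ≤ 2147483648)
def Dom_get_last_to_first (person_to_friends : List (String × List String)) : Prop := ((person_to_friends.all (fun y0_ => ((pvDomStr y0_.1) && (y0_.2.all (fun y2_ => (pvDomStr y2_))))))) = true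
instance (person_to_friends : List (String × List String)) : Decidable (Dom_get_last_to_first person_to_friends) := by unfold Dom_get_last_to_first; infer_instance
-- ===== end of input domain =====

-- B sorts the set of (last name, first name) pairs once and groups adjacent pairs by last
-- name (then orders the keys by first occurrence), instead of A's incremental dict that
-- membership-tests and re-sorts a per-key list after every single name.

-- ===== PORT A =====

-- hand port of `name.rsplit(' ', 1)[0]` (rsplit is not in PySem): exact — the part before
-- the LAST ' ' of the string, the whole string when it has no ' '.
def pyRsplitSpace1Head (cs : List Char) : List Char :=
  let i := PySem.Chars.rfind cs [' ']
  if i < 0 then cs else cs.take i.toNat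

-- hand port of `name.rsplit(' ')[-1]`: exact — the part after the LAST ' ' of the string,
-- the whole string when it has no ' '.
def pyRsplitSpaceLast (cs : List Char) : List Char :=
  let i := PySem.Chars.rfind cs [' ']
  if i < 0 then cs else cs.drop (i.toNat + 1)

def update_dict (key : String) (value : String)
    (key_to_values : PySem.Dict String (List String)) : PySem.Dict String (List String) :=
  let d := if key_to_values.contains key then key_to_values else key_to_values.insert key []
  if value ∈ d.getD key [] then d else d.insert key (d.getD key [] ++ [value])

def get_last_to_first (person_to_friends : List (String × List String)) : List (String × List String) :=
  -- the Python argument is a dict: duplicate keys collapse Python-style (ofList)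
  let p2f := PySem.Dict.ofList person_to_friends
  let list_friends := p2f.items.foldl
    (fun acc kv => (p2f.getD kv.1 []).foldl (fun a value => a ++ [value, kv.1]) acc) []
  let dict_lastname := list_friends.foldl
    (fun d name =>
      let first_name := String.ofList (pyRsplitSpace1Head name.toList)
      let last_name := String.ofList (pyRsplitSpaceLast name.toList)
      let d' := update_dict last_name first_name d
      d'.insert last_name (PySem.List.sorted (d'.getD last_name []) (fun x => x) false))
    PySem.Dict.empty
  dict_lastname.items

-- ===== PORT B =====

-- hand port of Source B's split_name (rpartition at the last ' ' via rfind: exact —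
-- rpartition returns ('', '', name) when there is no ' ', so (tail, head if sep else tail)
-- is (name, name) exactly when rfind is -1)
def splitName (name : String) : String × String :=
  let i := PySem.Str.rfind name " "
  if i < 0 then (name, name)
  else (PySem.Str.slice name (some (i + 1)) none, PySem.Str.slice name none (some i))

def get_last_to_first_alt (person_to_friends : List (String × List String)) : List (String × List String) :=
  let p2f := PySem.Dict.ofList person_to_friends
  let names := p2f.items.foldl
    (fun acc kv => kv.2.foldl (fun a friend => a ++ [friend, kv.1]) acc) []
  let pairs := names.map splitName
  -- sorted(set(pairs)): Python sorts tuples lexicographically — sorted2 with fst/snd keys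
  -- over the set of the pairs
  let grouped := (PySem.List.sorted2 (PySem.Set.ofList pairs) (fun q => q.1) (fun q => q.2)
      false).foldl
    (fun g q => PySem.Dict.modify g q.1 [] (fun v => v ++ [q.2])) PySem.Dict.empty
    -- grouped.setdefault(last, []).append(first) mutates the stored list in place:
    -- exactly Dict.modify with default []
  -- {last: grouped[last] for last, _ in pairs}: insert overwrites in place, new keys
  -- append; grouped[last] never raises (every last of pairs is a key of grouped), so the
  -- lookup is ported total as getD
  let result := pairs.foldl (fun r q => r.insert q.1 (grouped.getD q.1 [])) PySem.Dict.empty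
  result.items

-- ===== PRECONDITION & SPEC =====
def Spec_get_last_to_first (person_to_friends : List (String × List String)) (out : List (String × List String)) : Prop := out = get_last_to_first_alt person_to_friends
instance (person_to_friends : List (String × List String)) (out : List (String × List String)) : Decidable (Spec_get_last_to_first person_to_friends out) := by unfold Spec_get_last_to_first; infer_instance

-- ===== CLAIM (what is proved, stated in full; the proofs are below) =====
def Claim_equal_get_last_to_first : Prop := ∀ (person_to_friends : List (String × List String)), Dom_get_last_to_first person_to_friends → Spec_get_last_to_first person_to_friends (get_last_to_first person_to_friends)

-- ===== LEMMAS AND PROOFS =====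

-- A's per-name step, extracted (definitionally the lambda of A's second loop)
def stepA (d : PySem.Dict String (List String)) (name : String) : PySem.Dict String (List String) :=
  let first_name := String.ofList (pyRsplitSpace1Head name.toList)
  let last_name := String.ofList (pyRsplitSpaceLast name.toList)
  let d' := update_dict last_name first_name d
  d'.insert last_name (PySem.List.sorted (d'.getD last_name []) (fun x => x) false)

-- the abstract model step: record first name q.2 in the set stored under last name q.1
def modStep (d : PySem.Dict String (PySem.Set String)) (q : String × String) :
    PySem.Dict String (PySem.Set String) :=
  PySem.Dict.modify d q.1 PySem.Set.empty (fun s => PySem.Set.add s q.2)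

-- A's value at a key is the model's set at that key, sorted
def sortify (p : String × List String) : String × List String :=
  (p.1, PySem.List.sorted p.2 (fun x => x) false)

def mir (d : PySem.Dict String (List String)) : PySem.Dict String (List String) :=
  PySem.Dict.mk (d.items.map sortify)

theorem contains_mir (d : PySem.Dict String (List String)) (k : String) :
    (mir d).contains k = d.contains k := by
  simp [mir, PySem.Dict.contains, List.any_map, Function.comp_def, sortify]

theorem get?_mir (d : PySem.Dict String (List String)) (k : String) :
    (mir d).get? k = (d.get? k).map (fun v => PySem.List.sorted v (fun x => x) false) := by
  obtain ⟨items⟩ := d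
  induction items with
  | nil => rfl
  | cons p ps ih =>
    obtain ⟨pk, pv⟩ := p
    rw [show mir (PySem.Dict.mk ((pk, pv) :: ps))
        = PySem.Dict.mk ((pk, PySem.List.sorted pv (fun x => x) false) :: ps.map sortify)
      from rfl]
    rw [PySem.Dict.get?_mk_cons, PySem.Dict.get?_mk_cons]
    by_cases hp : pk == k
    · simp [hp]
    · simp only [hp, Bool.false_eq_true, if_false]
      exact ih

theorem getD_mir (d : PySem.Dict String (List String)) (k : String) :
    (mir d).getD k [] = PySem.List.sorted (d.getD k []) (fun x => x) false := by
  rw [PySem.Dict.getD_eq_get?_getD, PySem.Dict.getD_eq_get?_getD, get?_mir]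
  cases h : d.get? k with
  | none => rfl
  | some v => rfl

theorem mir_items (d : PySem.Dict String (List String)) :
    (mir d).items = d.items.map sortify := rfl

theorem mir_mk (l : List (String × List String)) :
    mir (PySem.Dict.mk l) = PySem.Dict.mk (l.map sortify) := rfl

theorem insert_mir (d : PySem.Dict String (List String)) (k : String) (v : List String) :
    (mir d).insert k (PySem.List.sorted v (fun x => x) false) = mir (d.insert k v) := by
  have hfun : (fun p : String × List String =>
        if (p.1 == k) = true then (k, PySem.List.sorted v (fun x => x) false) else p) ∘ sortify
      = sortify ∘ (fun p : String × List String => if (p.1 == k) = true then (k, v) else p) := by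
    funext p
    by_cases hp : p.1 = k <;> simp [sortify, Function.comp, hp]
  simp only [PySem.Dict.insert, contains_mir]
  cases hc : d.contains k with
  | true =>
    rw [if_pos rfl, if_pos rfl, mir_items, mir_mk, List.map_map, List.map_map, hfun]
  | false =>
    simp only [Bool.false_eq_true, if_false]
    rw [mir_items, mir_mk, List.map_append]
    simp [sortify]

theorem str_rfind_space (name : String) :
    PySem.Str.rfind name " " = PySem.Chars.rfind name.toList [' '] := by
  rw [PySem.Str.rfind_eq]
  rfl

-- the two ways of splitting a name agree: A's rsplit pieces are B's splitName components
theorem split_first_eq (name : String) :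
    String.ofList (pyRsplitSpace1Head name.toList) = (splitName name).2 := by
  unfold splitName
  rw [str_rfind_space]
  unfold pyRsplitSpace1Head
  by_cases hi : PySem.Chars.rfind name.toList [' '] < 0
  · simp [hi]
  · apply String.toList_inj.mp
    simp only [hi, if_false]
    have hb : (0:Int) ≤ PySem.Chars.rfind name.toList [' '] := by omega
    rw [PySem.Str.toList_slice, PySem.Chars.slice_eq_listSlice,
      PySem.List.slice_to _ hb]
    simp

theorem split_last_eq (name : String) :
    String.ofList (pyRsplitSpaceLast name.toList) = (splitName name).1 := by
  unfold splitName
  rw [str_rfind_space]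
  unfold pyRsplitSpaceLast
  by_cases hi : PySem.Chars.rfind name.toList [' '] < 0
  · simp [hi]
  · apply String.toList_inj.mp
    simp only [hi, if_false]
    have ha : (0:Int) ≤ PySem.Chars.rfind name.toList [' '] + 1 := by omega
    rw [PySem.Str.toList_slice, PySem.Chars.slice_eq_listSlice,
      PySem.List.slice_from _ ha]
    have h1 : (PySem.Chars.rfind name.toList [' '] + 1).toNat
        = (PySem.Chars.rfind name.toList [' ']).toNat + 1 := by omega
    simp [h1]

theorem sorted_singleton (x : String) :
    PySem.List.sorted [x] (fun y => y) false = [x] :=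
  PySem.List.sorted_eq_self_of_pairwise _ _ (List.pairwise_singleton _ _)

-- one A-step (update_dict then re-sort) on the mirror, with the same key/value,
-- is the mirror of one model step (set-insertion)
theorem upd_mir (d : PySem.Dict String (PySem.Set String)) (last first : String) :
    (update_dict last first (mir d)).insert last
      (PySem.List.sorted ((update_dict last first (mir d)).getD last []) (fun x => x) false)
    = mir (PySem.Dict.modify d last PySem.Set.empty (fun s => PySem.Set.add s first)) := by
  simp only [update_dict, PySem.Dict.modify, contains_mir]
  cases hc : d.contains last with
  | true =>
    simp only [if_true]
    rw [getD_mir]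
    by_cases hm : first ∈ d.getD last []
    · rw [if_pos ((PySem.List.mem_sorted _ _ _ _).mpr hm), getD_mir,
        PySem.List.sorted_sorted]
      have hadd : PySem.Set.add (d.getD last PySem.Set.empty) first = d.getD last [] := by
        rw [PySem.Set.add_eq_ite]
        exact if_pos hm
      rw [hadd]
      exact insert_mir d last (d.getD last [])
    · rw [if_neg (by simpa [PySem.List.mem_sorted] using hm),
        PySem.Dict.getD_insert_self, PySem.Dict.insert_insert_self]
      have hperm : (PySem.List.sorted (d.getD last []) (fun x => x) false ++ [first]).Perm
          (d.getD last [] ++ [first]) :=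
        (PySem.List.sorted_perm (d.getD last []) _ false).append_right [first]
      rw [PySem.List.sorted_eq_sorted_of_perm _ _ _ (fun a b h => h) hperm]
      have hadd : PySem.Set.add (d.getD last PySem.Set.empty) first
          = d.getD last [] ++ [first] := by
        rw [PySem.Set.add_eq_ite]
        exact if_neg hm
      rw [hadd]
      exact insert_mir d last (d.getD last [] ++ [first])
  | false =>
    simp only [Bool.false_eq_true, if_false]
    rw [PySem.Dict.getD_insert_self, if_neg (List.not_mem_nil), List.nil_append,
      PySem.Dict.getD_insert_self, PySem.Dict.insert_insert_self,
      PySem.Dict.insert_insert_self, sorted_singleton]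
    have hempty : d.getD last PySem.Set.empty = PySem.Set.empty :=
      PySem.Dict.getD_of_not_contains _ _ hc
    rw [hempty]
    have hadd : PySem.Set.add PySem.Set.empty first = [first] := by
      rw [PySem.Set.add_eq_ite]
      exact if_neg (List.not_mem_nil)
    rw [hadd, ← sorted_singleton first]
    exact insert_mir d last [first]

-- one A-step on the mirror is the mirror of one model step on the split pair
theorem step_mir (d : PySem.Dict String (PySem.Set String)) (name : String) :
    stepA (mir d) name = mir (modStep d (splitName name)) := by
  simp only [stepA, modStep]
  rw [split_first_eq name, split_last_eq name]
  exact upd_mir d _ _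

theorem foldl_step_mir (names : List String) (d : PySem.Dict String (PySem.Set String)) :
    names.foldl stepA (mir d)
      = mir (names.foldl (fun d n => modStep d (splitName n)) d) := by
  induction names generalizing d with
  | nil => rfl
  | cons n names ih =>
    simp only [List.foldl_cons]
    rw [step_mir, ih]

-- A's inner lookup p2f[key] is just the item's own value (ofList has nodup keys)
theorem getD_items_self (ps : List (String × List String)) (kv : String × List String)
    (h : kv ∈ (PySem.Dict.ofList ps).items) :
    (PySem.Dict.ofList ps).getD kv.1 [] = kv.2 :=
  PySem.Dict.getD_of_mem_items (d := PySem.Dict.ofList ps)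
    (by exact h) (PySem.Dict.nodup_keys_ofList ps) []

-- the flattened name list, as both ports build it
def namesOf (p : List (String × List String)) : List String :=
  (PySem.Dict.ofList p).items.foldl
    (fun acc kv => kv.2.foldl (fun a friend => a ++ [friend, kv.1]) acc) []

theorem portA_eq (p : List (String × List String)) :
    get_last_to_first p
      = (mir (((namesOf p).map splitName).foldl modStep PySem.Dict.empty)).items := by
  simp only [get_last_to_first]
  have hnames : (PySem.Dict.ofList p).items.foldl
        (fun acc kv => ((PySem.Dict.ofList p).getD kv.1 []).foldl
          (fun a value => a ++ [value, kv.1]) acc) []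
      = namesOf p :=
    PySem.List.foldl_congr_mem _ _ _ _ (fun acc kv hkv => by rw [getD_items_self p kv hkv])
  rw [hnames]
  have hstart : (PySem.Dict.empty : PySem.Dict String (List String))
      = mir PySem.Dict.empty := rfl
  rw [show ((namesOf p).foldl
        (fun d name =>
          let first_name := String.ofList (pyRsplitSpace1Head name.toList)
          let last_name := String.ofList (pyRsplitSpaceLast name.toList)
          let d' := update_dict last_name first_name d
          d'.insert last_name (PySem.List.sorted (d'.getD last_name []) (fun x => x) false))
        PySem.Dict.empty)
      = (namesOf p).foldl stepA (mir PySem.Dict.empty) from rfl]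
  rw [foldl_step_mir, ← List.foldl_map]

-- the set accumulated at a key by the model fold is exactly the set of firsts filed under it
theorem getD_foldl_modStep (qs : List (String × String))
    (d : PySem.Dict String (PySem.Set String)) (l : String) :
    (qs.foldl modStep d).getD l PySem.Set.empty
      = PySem.Set.update (d.getD l PySem.Set.empty)
          ((qs.filter (fun q => q.1 == l)).map (fun q => q.2)) := by
  induction qs generalizing d with
  | nil => rfl
  | cons q qs ih =>
    simp only [List.foldl_cons, List.filter_cons]
    rw [ih]
    by_cases hq : q.1 = l
    · simp only [hq, BEq.rfl, if_true, List.map_cons, PySem.Set.update_cons]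
      rw [show modStep d q = PySem.Dict.modify d q.1 PySem.Set.empty
          (fun s => PySem.Set.add s q.2) from rfl, hq, PySem.Dict.getD_modify_self]
    · have hbe : (q.1 == l) = false := by simpa using hq
      simp only [hbe, Bool.false_eq_true, if_false]
      rw [show modStep d q = PySem.Dict.modify d q.1 PySem.Set.empty
          (fun s => PySem.Set.add s q.2) from rfl,
        PySem.Dict.getD_modify_of_ne _ _ _ (fun h => hq h.symm)]

-- Python's sorted on (String, String) tuples is the lexicographic sort: sorted2 with the
-- two projection keys is sorting by the Lex product key
theorem sorted2_eq_sorted_lex (xs : List (String × String)) :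
    PySem.List.sorted2 xs (fun q => q.1) (fun q => q.2) false
      = PySem.List.sorted xs (fun q => toLex (q.1, q.2)) false := by
  rw [PySem.List.sorted_eq_foldl_insertBy]
  simp only [PySem.List.sorted2]
  congr 1
  funext acc q
  congr 1
  funext a b
  rw [show (decide (toLex (a.1, a.2) < toLex (b.1, b.2)))
      = decide (a.1 < b.1 ∨ a.1 = b.1 ∧ a.2 < b.2) from
    (decide_eq_decide).mpr (by rw [Prod.Lex.toLex_lt_toLex])]
  rcases lt_trichotomy a.1 b.1 with h | h | h
  · simp [h, h.not_gt]
  · simp [h]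
  · simp [h, h.not_gt, h.ne']

-- the sorted unique pair list is STRICTLY increasing under the Lex key
theorem pairsSorted_pairwise (qs : List (String × String)) :
    (PySem.List.sorted (PySem.Set.ofList qs) (fun q => toLex (q.1, q.2)) false).Pairwise
      (fun a b => toLex (a.1, a.2) < toLex (b.1, b.2)) := by
  have hle := PySem.List.sorted_pairwise (PySem.Set.ofList qs)
    (fun q => toLex (q.1, q.2))
  have hnd : (PySem.List.sorted (PySem.Set.ofList qs)
      (fun q => toLex (q.1, q.2)) false).Nodup :=
    (PySem.List.sorted_perm (PySem.Set.ofList qs) _ false).nodup_iff.mpr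
      (PySem.Set.nodup_ofList qs)
  refine (hle.and hnd).imp ?_
  rintro a b ⟨hab, hne⟩
  refine lt_of_le_of_ne hab ?_
  intro h
  apply hne
  have h2 := congrArg (fun x : Lex (String × String) => ofLex x) h
  simpa using h2

-- the group stored under c is exactly the sorted set of c's first names
theorem grouped_getD (qs : List (String × String)) (c : String) :
    ((PySem.List.sorted2 (PySem.Set.ofList qs) (fun q => q.1) (fun q => q.2) false).foldl
        (fun g q => PySem.Dict.modify g q.1 [] (fun v => v ++ [q.2]))
        PySem.Dict.empty).getD c []
      = PySem.List.sorted
          (PySem.Set.ofList ((qs.filter (fun q => q.1 == c)).map (fun q => q.2)))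
          (fun x => x) false := by
  rw [sorted2_eq_sorted_lex, PySem.Dict.getD_foldl_modify_append, PySem.Dict.getD_empty,
    List.nil_append]
  set ps := PySem.List.sorted (PySem.Set.ofList qs) (fun q => toLex (q.1, q.2)) false with hps
  -- the filtered-and-projected column of the sorted pair list names the sorted set:
  -- it is a permutation of the set and strictly increasing
  refine (PySem.List.sorted_eq_of_perm_of_pairwise_lt
    (PySem.Set.ofList ((qs.filter (fun q => q.1 == c)).map (fun q => q.2)))
    ((ps.filter (fun q => q.1 == c)).map (fun q => q.2)) (fun x => x) ?_ ?_).symm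
  · -- permutation: both are Nodup with the same members
    have hnodup1 : ((ps.filter (fun q => q.1 == c)).map (fun q => q.2)).Nodup := by
      have hndps : ps.Nodup :=
        (PySem.List.sorted_perm (PySem.Set.ofList qs) _ false).nodup_iff.mpr
          (PySem.Set.nodup_ofList qs)
      refine List.Nodup.map_on ?_ (hndps.filter _)
      intro x hx y hy hxy
      have hxc : x.1 = c := by simpa using (List.of_mem_filter hx)
      have hyc : y.1 = c := by simpa using (List.of_mem_filter hy)
      exact Prod.ext (hxc.trans hyc.symm) hxy
    refine (List.perm_ext_iff_of_nodup hnodup1 (PySem.Set.nodup_ofList _)).mpr ?_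
    have hmemps : ∀ q : String × String, q ∈ ps ↔ q ∈ qs := by
      intro q
      rw [(PySem.List.sorted_perm (PySem.Set.ofList qs) _ false).mem_iff]
      simp [PySem.Set.mem_ofList]
    intro a
    simp only [List.mem_map, List.mem_filter, PySem.Set.mem_ofList]
    constructor
    · rintro ⟨x, ⟨hx, hxc⟩, rfl⟩
      exact ⟨x, ⟨(hmemps x).mp hx, hxc⟩, rfl⟩
    · rintro ⟨x, ⟨hx, hxc⟩, rfl⟩
      exact ⟨x, ⟨(hmemps x).mpr hx, hxc⟩, rfl⟩
  · -- strictly increasing: within one fst-group, Lex order is snd order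
    rw [List.pairwise_map]
    refine List.Pairwise.imp_of_mem ?_ ((pairsSorted_pairwise qs).filter _)
    intro a b ha hb hab
    have hac : a.1 = c := by simpa using (List.of_mem_filter ha)
    have hbc : b.1 = c := by simpa using (List.of_mem_filter hb)
    rcases Prod.Lex.toLex_lt_toLex.mp hab with h | ⟨_, h⟩
    · rw [hac, hbc] at h
      exact absurd h (lt_irrefl c)
    · exact h

-- B's output comprehension, tracked against the model fold: it lists the model's keys in
-- order, each carrying val of the key
theorem insB_inv (G : PySem.Dict String (List String)) (qs : List (String × String))
    (d : PySem.Dict String (PySem.Set String)) (r : PySem.Dict String (List String))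
    (hr : r.items = d.items.map (fun p => (p.1, G.getD p.1 []))) :
    (qs.foldl (fun r q => r.insert q.1 (G.getD q.1 [])) r).items
      = (qs.foldl modStep d).items.map (fun p => (p.1, G.getD p.1 [])) := by
  induction qs generalizing d r with
  | nil => exact hr
  | cons q qs ih =>
    simp only [List.foldl_cons]
    have hkeys : r.keys = d.keys := by
      simp only [PySem.Dict.keys, hr, List.map_map]
      rfl
    have hcont : r.contains q.1 = d.contains q.1 := by
      rw [PySem.Dict.contains_eq_decide_mem_keys, PySem.Dict.contains_eq_decide_mem_keys, hkeys]
    refine ih (modStep d q) _ ?_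
    rw [show modStep d q = d.insert q.1 (PySem.Set.add (d.getD q.1 PySem.Set.empty) q.2)
      from rfl]
    cases hc : d.contains q.1 with
    | true =>
      rw [PySem.Dict.items_insert_of_contains _ _ hc,
        PySem.Dict.items_insert_of_contains _ _ (hcont.trans hc), hr, List.map_map,
        List.map_map]
      congr 1
      funext p
      by_cases hp : p.1 = q.1 <;> simp [Function.comp, hp]
    | false =>
      rw [PySem.Dict.items_insert_of_not_contains _ _ hc,
        PySem.Dict.items_insert_of_not_contains _ _ (hcont.trans hc), hr, List.map_append]
      rfl

-- the suffix of B's port after the name list is built, abstracted over that list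
def altTail (nm : List String) : List (String × List String) :=
  let pairs := nm.map splitName
  let grouped := (PySem.List.sorted2 (PySem.Set.ofList pairs) (fun q => q.1) (fun q => q.2)
      false).foldl
    (fun g q => PySem.Dict.modify g q.1 [] (fun v => v ++ [q.2])) PySem.Dict.empty
  let result := pairs.foldl (fun r q => r.insert q.1 (grouped.getD q.1 [])) PySem.Dict.empty
  result.items

theorem portB_eq (nm : List String) :
    altTail nm
      = ((nm.map splitName).foldl modStep PySem.Dict.empty).items.map
          (fun q =>
            (q.1,
              ((PySem.List.sorted2 (PySem.Set.ofList (nm.map splitName))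
                  (fun q => q.1) (fun q => q.2) false).foldl
                (fun g q => PySem.Dict.modify g q.1 [] (fun v => v ++ [q.2]))
                PySem.Dict.empty).getD q.1 [])) := by
  simp only [altTail]
  exact insB_inv _ (nm.map splitName) PySem.Dict.empty PySem.Dict.empty rfl

theorem alt_eq_tail (p : List (String × List String)) :
    get_last_to_first_alt p = altTail (namesOf p) := rfl

-- ===== VERDICT (by name: the statement is the Claim_ definition above) =====
theorem get_last_to_first_spec : Claim_equal_get_last_to_first := by
  intro p _
  show get_last_to_first p = get_last_to_first_alt p
  rw [portA_eq, alt_eq_tail, portB_eq, mir_items]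
  set pairs := (namesOf p).map splitName with hpairs
  set D := pairs.foldl modStep PySem.Dict.empty with hD
  apply List.map_congr_left
  intro q hq
  obtain ⟨l, sset⟩ := q
  have hnodup : D.keys.Nodup := by
    rw [hD]
    exact PySem.Dict.nodup_keys_foldl_modify_key pairs (fun q => q.1) PySem.Set.empty
      (fun _ q => fun s => PySem.Set.add s q.2) PySem.Dict.empty
      PySem.Dict.nodup_keys_empty
  have hval : sset = PySem.Set.ofList
      ((pairs.filter (fun q2 => q2.1 == l)).map (fun q2 => q2.2)) := by
    have h1 : D.getD l PySem.Set.empty = sset :=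
      PySem.Dict.getD_of_mem_items D hq hnodup PySem.Set.empty
    rw [← h1, hD, getD_foldl_modStep, PySem.Dict.getD_empty]
    rfl
  show (l, PySem.List.sorted sset (fun x => x) false) = _
  rw [hval, ← grouped_getD pairs l]
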